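-- pv_equiv track=rewrite | github.com/pypi-data/pypi-mirror-404 | packages/miesc/miesc-4.5.3.tar.gz/miesc-4.5.3/src/benchmark/slither_benchmark.py | _cats_related
-- ===== SOURCE A (Python) =====
-- def _cats_related(c1: str, c2: str) -> bool:
--     """Check if categories are related."""
--     groups = [
--         {"reentrancy", "unchecked_low_level_calls"},
--         {"access_control"},
--         {"bad_randomness", "time_manipulation"},
--     ]
--     for g in groups:
--         if c1 in g and c2 in g:
--             return True
--     return False
-- ===== SOURCE B (Python) =====
-- def _cats_related(c1: str, c2: str) -> bool:
--     """Check if categories are related."""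
--     if c1 == c2:
--         # diagonal: related iff the category is one we know at all
--         return c1 in ("reentrancy", "unchecked_low_level_calls",
--                       "access_control", "bad_randomness", "time_manipulation")
--     # off-diagonal: only the two cross pairs are related, in either order
--     cross = (("reentrancy", "unchecked_low_level_calls"),
--              ("bad_randomness", "time_manipulation"))
--     return (c1, c2) in cross or (c2, c1) in cross
-- ===== Notes on version B (the rewrite author's own statement) =====
-- stated objective: alternative
-- what changed: Removes the group containers entirely: B splits on symmetry, answering the diagonal case (c1 == c2) by a known-category test and the off-diagonal case by comparing the pair against the only two cross pairs in either order.
import Mathlib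
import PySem

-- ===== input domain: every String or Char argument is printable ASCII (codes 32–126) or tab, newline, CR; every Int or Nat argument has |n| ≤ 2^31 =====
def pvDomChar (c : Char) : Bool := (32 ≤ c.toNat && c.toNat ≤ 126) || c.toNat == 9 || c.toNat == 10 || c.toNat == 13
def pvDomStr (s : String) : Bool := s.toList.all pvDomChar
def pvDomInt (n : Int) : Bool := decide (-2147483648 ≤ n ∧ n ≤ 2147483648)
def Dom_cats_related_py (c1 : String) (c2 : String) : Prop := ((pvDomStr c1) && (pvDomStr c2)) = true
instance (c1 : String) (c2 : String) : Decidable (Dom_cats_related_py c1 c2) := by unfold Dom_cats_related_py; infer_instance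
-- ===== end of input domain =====

-- B drops the group containers: it splits on symmetry (diagonal = known-category test,
-- off-diagonal = the two cross pairs in either order); an alternative of the same cost.

-- ===== PORT A =====
-- the literal list of groups from A
def pvGroups : List (PySem.Set String) :=
  [PySem.Set.ofList ["reentrancy", "unchecked_low_level_calls"],
   PySem.Set.ofList ["access_control"],
   PySem.Set.ofList ["bad_randomness", "time_manipulation"]]

-- the 'for g in groups' loop with early return
def pvCatsLoop (c1 : String) (c2 : String) : List (PySem.Set String) → Bool
  | [] => false
  | g :: rest =>
    if PySem.Set.contains g c1 && PySem.Set.contains g c2 then true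
    else pvCatsLoop c1 c2 rest

def cats_related_py (c1 : String) (c2 : String) : Bool :=
  pvCatsLoop c1 c2 pvGroups

-- ===== PORT B =====
def pvKnownCats : List String :=
  ["reentrancy", "unchecked_low_level_calls", "access_control",
   "bad_randomness", "time_manipulation"]

def pvCross : List (String × String) :=
  [("reentrancy", "unchecked_low_level_calls"), ("bad_randomness", "time_manipulation")]

def cats_related_py_alt (c1 : String) (c2 : String) : Bool :=
  if c1 == c2 then pvKnownCats.contains c1
  else pvCross.contains (c1, c2) || pvCross.contains (c2, c1)

-- ===== PRECONDITION & SPEC =====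
def Spec_cats_related_py (c1 : String) (c2 : String) (out : Bool) : Prop := out = cats_related_py_alt c1 c2
instance (c1 : String) (c2 : String) (out : Bool) : Decidable (Spec_cats_related_py c1 c2 out) := by unfold Spec_cats_related_py; infer_instance

-- ===== CLAIM (what is proved, stated in full; the proofs are below) =====
def Claim_equal_cats_related_py : Prop := ∀ (c1 : String) (c2 : String), Dom_cats_related_py c1 c2 → Spec_cats_related_py c1 c2 (cats_related_py c1 c2)

-- ===== LEMMAS AND PROOFS =====

-- ===== VERDICT (by name: the statement is the Claim_ definition above) =====
set_option maxHeartbeats 2000000 in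
theorem cats_related_py_spec : Claim_equal_cats_related_py := by
  intro c1 c2 _
  unfold Spec_cats_related_py cats_related_py cats_related_py_alt pvGroups pvKnownCats pvCross
  by_cases h1 : c1 = "reentrancy" <;>
  by_cases h2 : c1 = "unchecked_low_level_calls" <;>
  by_cases h3 : c1 = "access_control" <;>
  by_cases h4 : c1 = "bad_randomness" <;>
  by_cases h5 : c1 = "time_manipulation" <;>
  by_cases g1 : c2 = "reentrancy" <;>
  by_cases g2 : c2 = "unchecked_low_level_calls" <;>
  by_cases g3 : c2 = "access_control" <;>
  by_cases g4 : c2 = "bad_randomness" <;>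
  by_cases g5 : c2 = "time_manipulation" <;>
  subst_vars <;>
  simp_all [pvCatsLoop, PySem.Set.ofList, PySem.Set.contains, PySem.Set.add,
    List.contains_eq_mem, List.mem_cons, Prod.ext_iff, beq_iff_eq] <;>
  exact fun h => absurd h.symm (by assumption)
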